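-- pv_equiv track=rewrite | github.com/naddb/crypto | des.py | bit_array_2string
-- ===== SOURCE A (Python) =====
-- def bit_array_2string(array):
--     # Перевод массива битов в текст
--     # Делим на блоки по 8 бит (буква всегда размером в 8 бит)
--     byte_blocks = [array[i : i + 8] for i in range(0, len(array), 8)]
--     byte_string = []
--     # Для каждого байта (8 бит)
--     for byte in byte_blocks:
--         bits = []
--         # Для каждого бита в байте
--         for bit in byte:
--             # Добавляем в строку биты
--             bits += str(bit)
--         # Добавляем строку в массив
--         byte_string.append("".join(bits))
--     # Каждую строку переводим в букву и возвращаем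
--     return "".join([chr(int(str_byte, 2)) for str_byte in byte_string])
-- ===== SOURCE B (Python) =====
-- def bit_array_2string(array):
--     chars = []
--     buf = ""
--     for i, bit in enumerate(array, 1):
--         buf += str(bit)
--         if i % 8 == 0:
--             chars.append(chr(int(buf, 2)))
--             buf = ""
--     if buf:
--         chars.append(chr(int(buf, 2)))
--     return "".join(chars)
-- ===== Notes on version B (the rewrite author's own statement) =====
-- stated objective: simpler
-- what changed: A first slices the array into 8-element blocks, builds a list of digit strings and then maps chr(int(s, 2)) over it in a second phase; B is one streaming pass with enumerate: it appends each element's digits to a small buffer and flushes chr(int(buf, 2)) every 8 elements plus once for a trailing partial block, with no block list and no second phase. …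
import Mathlib
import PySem

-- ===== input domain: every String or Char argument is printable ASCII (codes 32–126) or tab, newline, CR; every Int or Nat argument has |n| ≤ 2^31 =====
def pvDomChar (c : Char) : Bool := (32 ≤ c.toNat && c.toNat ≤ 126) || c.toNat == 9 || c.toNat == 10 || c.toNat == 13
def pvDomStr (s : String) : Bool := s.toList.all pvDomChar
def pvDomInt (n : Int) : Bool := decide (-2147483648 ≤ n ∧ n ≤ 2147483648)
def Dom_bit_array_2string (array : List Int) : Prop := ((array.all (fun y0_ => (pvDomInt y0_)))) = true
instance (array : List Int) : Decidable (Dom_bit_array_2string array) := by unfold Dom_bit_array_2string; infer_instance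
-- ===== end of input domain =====

-- B replaces A's two-phase slice-into-blocks / map-chr(int(s,2)) pipeline by one
-- streaming enumerate pass with a digit buffer flushed every 8 elements (simpler: one
-- pass, no intermediate block lists).


-- chr(n): exact for 0 ≤ n < 0x110000 (under Pre_ every value fed to it lies there)
def pyChr (n : Int) : Char := if 0 ≤ n ∧ n < 1114112 then Char.ofNat n.toNat else ' '

-- ===== PORT A =====
def bit_array_2string (array : List Int) : String :=
  let byte_blocks := (PySem.List.pyRange 0 (array.length : Int) 8).map
      (fun i => PySem.List.slice array (some i) (some (i + 8)))
  let byte_string := byte_blocks.foldl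
      (fun acc byte => acc ++ [byte.foldl (fun bits bit => bits ++ PySem.Int.toChars bit) ([] : List Char)])
      ([] : List (List Char))
  -- int(str_byte, 2) raises ValueError on a non-binary digit and chr raises on an
  -- out-of-range value: those inputs are excluded by Pre_, so the defaults are never hit
  String.mk (byte_string.map (fun str_byte => pyChr ((PySem.Int.ofCharsBase? str_byte 2).getD 0)))

-- ===== PORT B =====
-- B's loop body over enumerate(array, 1): append the element's digits to the buffer and
-- flush chr(int(buf, 2)) whenever the 1-based index is divisible by 8
def bAltStep (st : List Char × List Char) (p : Int × Int) : List Char × List Char :=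
  let buf := st.2 ++ PySem.Int.toChars p.2
  if p.1 % 8 = 0 then
    (st.1 ++ [pyChr ((PySem.Int.ofCharsBase? buf 2).getD 0)], [])
  else (st.1, buf)

def bit_array_2string_alt (array : List Int) : String :=
  let st := (PySem.List.enumerate array 1).foldl bAltStep (([] : List Char), ([] : List Char))
  String.mk (if st.2 ≠ [] then st.1 ++ [pyChr ((PySem.Int.ofCharsBase? st.2 2).getD 0)] else st.1)

-- ===== PRECONDITION & SPEC =====

-- the 8-element blocks A slices the array into (shape helper for Pre_; fuelled so that
-- the kernel can evaluate Pre_ by decide)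
def blocks8Go : Nat → List Int → List (List Int)
  | 0, _ => []
  | _ + 1, [] => []
  | n + 1, l => l.take 8 :: blocks8Go n (l.drop 8)

def blocks8 (l : List Int) : List (List Int) := blocks8Go l.length l

-- value of a decimal digit character
def charVal (c : Char) : Int := (c.toNat : Int) - 48

-- binary value accumulator over digit characters: a ← 2a + digit
def binAccC (v : Int) (s : List Char) : Int := s.foldl (fun a c => 2 * a + charVal c) v

-- the code point an 8-element block denotes: its concatenated decimal digits read in base 2
def blockVal (blk : List Int) : Int := binAccC 0 (blk.flatMap PySem.Int.toChars)

-- Pre_ excludes inputs on which A raises (a decimal digit other than 0/1 or an embedded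
-- sign makes int(s, 2) raise ValueError; a block whose digits read in base 2 give a value
-- ≥ 0x110000 makes chr raise ValueError) and inputs on which a block's value is a lone
-- surrogate code point, where the Python string A returns has no Lean String counterpart.
def Pre_bit_array_2string (array : List Int) : Prop :=
  (array.all (fun b => (PySem.Int.toChars b).all (fun c => c == '0' || c == '1'))) = true ∧
  ((blocks8 array).all (fun blk =>
      decide (blockVal blk < 1114112 ∧ ¬(55296 ≤ blockVal blk ∧ blockVal blk < 57344)))) = true
instance (array : List Int) : Decidable (Pre_bit_array_2string array) := by unfold Pre_bit_array_2string; infer_instance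

def pvWitness_bit_array_2string : List Int := [0, 1, 0, 0, 0, 0, 0, 1, 1, 0]

def Spec_bit_array_2string (array : List Int) (out : String) : Prop := out = bit_array_2string_alt array
instance (array : List Int) (out : String) : Decidable (Spec_bit_array_2string array out) := by unfold Spec_bit_array_2string; infer_instance

-- ===== CLAIM (what is proved, stated in full; the proofs are below) =====
def Claim_equal_bit_array_2string : Prop := ∀ (array : List Int), Dom_bit_array_2string array → Pre_bit_array_2string array → Spec_bit_array_2string array (bit_array_2string array)

-- ===== LEMMAS AND PROOFS =====

-- A's inner loop: the digit-character string of a block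
def aByteChars (byte : List Int) : List Char :=
  byte.foldl (fun bits bit => bits ++ PySem.Int.toChars bit) ([] : List Char)

-- the character both programs emit for a block's digit string: chr(int(s, 2))
def aChar (s : List Char) : Char := pyChr ((PySem.Int.ofCharsBase? s 2).getD 0)

-- A's result, chunk-recursively
def achars (l : List Int) : List Char :=
  if _h : l = [] then [] else aChar (aByteChars (l.take 8)) :: achars (l.drop 8)
termination_by l.length
decreasing_by
  simp only [List.length_drop]
  have : l.length ≠ 0 := fun hl => _h (List.eq_nil_of_length_eq_zero hl)
  omega

lemma aByteChars_eq (b : List Int) : aByteChars b = b.flatMap PySem.Int.toChars := by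
  unfold aByteChars
  rw [PySem.List.foldl_append_eq_flatMap]
  simp

lemma toDigitsCore_len (b : Nat) : ∀ (fuel n : Nat) (ds : List Char),
    ds.length ≤ (Nat.toDigitsCore b fuel n ds).length := by
  intro fuel
  induction fuel with
  | zero => intro n ds; simp [Nat.toDigitsCore]
  | succ f ihf =>
    intro n ds
    simp only [Nat.toDigitsCore]
    split
    · simp
    · exact le_trans (by simp) (ihf _ _)

-- str(n) is never the empty string
lemma toChars_ne_nil (n : Int) : PySem.Int.toChars n ≠ [] := by
  unfold PySem.Int.toChars
  split
  · simp
  · intro hnil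
    rw [Nat.toDigits] at hnil
    simp only [Nat.toDigitsCore] at hnil
    split at hnil
    · simp at hnil
    · have := toDigitsCore_len 10 n.toNat (n.toNat / 10) [(n.toNat % 10).digitChar]
      rw [hnil] at this
      simp at this

-- B's trailing-block finalisation
def bFinal (st : List Char × List Char) : List Char :=
  if st.2 ≠ [] then st.1 ++ [aChar st.2] else st.1

-- a stretch of indices containing no multiple of 8 only extends the buffer
lemma bfold_noflush : ∀ (u : List Int) (cs : List Char) (m : Int) (bf : List Char),
    (∀ j : Int, m ≤ j → j < m + (u.length : Int) → ¬(j % 8 = 0)) →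
    (PySem.List.enumerate u m).foldl bAltStep (cs, bf) =
      (cs, bf ++ u.flatMap PySem.Int.toChars) := by
  intro u
  induction u with
  | nil => intro cs m bf _; simp [PySem.List.enumerate_nil]
  | cons y v ihv =>
    intro cs m bf hj
    rw [PySem.List.enumerate_cons, List.foldl_cons]
    have hm : ¬(m % 8 = 0) := hj m le_rfl (by
      simp only [List.length_cons]; push_cast; omega)
    have hstep : bAltStep (cs, bf) (m, y) = (cs, bf ++ PySem.Int.toChars y) := by
      simp [bAltStep, hm]
    rw [hstep, ihv cs (m + 1) (bf ++ PySem.Int.toChars y) (by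
      intro j h1 h2
      refine hj j (by omega) (by simp only [List.length_cons] at *; push_cast at *; omega))]
    simp

-- a run of fewer than 8 elements after a flush point only extends the buffer
lemma bfold_partial (b : List Int) (cs buf : List Char) (k : Int)
    (hk : k % 8 = 0) (hk0 : 0 ≤ k) (hlt : (b.length : Int) < 8) :
    (PySem.List.enumerate b (k + 1)).foldl bAltStep (cs, buf) =
      (cs, buf ++ b.flatMap PySem.Int.toChars) := by
  exact bfold_noflush b cs (k + 1) buf (fun j h1 h2 => by omega)

-- a full block of 8 elements after a flush point flushes exactly its character
lemma bfold_full (b : List Int) (cs : List Char) (k : Int)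
    (hk : k % 8 = 0) (hk0 : 0 ≤ k) (hlen : b.length = 8) :
    (PySem.List.enumerate b (k + 1)).foldl bAltStep (cs, []) =
      (cs ++ [aChar (b.flatMap PySem.Int.toChars)], []) := by
  obtain ⟨t, x, rfl⟩ : ∃ t x, b = t ++ [x] := by
    rcases List.eq_nil_or_concat b with h | ⟨t, x, h⟩
    · rw [h] at hlen; simp at hlen
    · exact ⟨t, x, by rw [h, List.concat_eq_append]⟩
  have ht7 : t.length = 7 := by
    simp only [List.length_append, List.length_cons, List.length_nil] at hlen; omega
  rw [PySem.List.enumerate_append, List.foldl_append]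
  rw [bfold_partial t cs [] k hk hk0 (by rw [ht7]; norm_num)]
  rw [PySem.List.enumerate_cons, PySem.List.enumerate_nil, List.foldl_cons, List.foldl_nil]
  have hidx : k + 1 + (t.length : Int) = k + 8 := by rw [ht7]; omega
  have h8 : (k + 1 + (t.length : Int)) % 8 = 0 := by rw [hidx]; omega
  simp only [bAltStep, h8, if_pos]
  simp [aChar]

-- B's streaming loop, started at any flush point, produces A's chunked characters
lemma main_loop : ∀ (n : Nat) (l : List Int), l.length ≤ n →
    ∀ (k : Int) (cs : List Char), k % 8 = 0 → 0 ≤ k →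
    bFinal ((PySem.List.enumerate l (k + 1)).foldl bAltStep (cs, [])) = cs ++ achars l := by
  intro n
  induction n with
  | zero =>
    intro l hl k cs _ _
    have : l = [] := List.eq_nil_of_length_eq_zero (by omega)
    subst this
    simp [PySem.List.enumerate_nil, bFinal, achars]
  | succ n ih =>
    intro l hl k cs hk hk0
    by_cases hnil : l = []
    · subst hnil; simp [PySem.List.enumerate_nil, bFinal, achars]
    by_cases hsmall : l.length < 8
    · rw [bfold_partial l cs [] k hk hk0 (by omega)]
      have hbuf : l.flatMap PySem.Int.toChars ≠ [] := by
        obtain ⟨x, t, rfl⟩ := List.exists_cons_of_ne_nil hnil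
        simp only [List.flatMap_cons]
        intro h
        exact toChars_ne_nil x (List.append_eq_nil_iff.mp h).1
      conv_rhs => rw [achars]
      rw [dif_neg hnil, List.take_of_length_le (by omega), List.drop_eq_nil_of_le (by omega),
        aByteChars_eq]
      rw [show achars [] = [] from by rw [achars]; simp]
      simp [bFinal, hbuf]
    · -- a full leading block of 8 elements, then recurse from the next flush point k + 8
      have h8 : 8 ≤ l.length := by omega
      have htake : (l.take 8).length = 8 := by simp [List.length_take]; omega
      conv_lhs => rw [← List.take_append_drop 8 l]
      rw [PySem.List.enumerate_append, List.foldl_append,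
        bfold_full (l.take 8) cs k hk hk0 htake]
      have hre : k + 1 + ((l.take 8).length : Int) = (k + 8) + 1 := by
        rw [htake]; push_cast; ring
      rw [hre, ih (l.drop 8) (by simp [List.length_drop]; omega) (k + 8)
        (cs ++ [aChar ((l.take 8).flatMap PySem.Int.toChars)]) (by omega) (by omega)]
      conv_rhs => rw [achars]
      rw [dif_neg hnil, aByteChars_eq]
      simp

lemma chunkA : ∀ (m : Nat) (l : List Int), l.length ≤ 8 * m → 8 * m < l.length + 8 →
    (List.range m).map (fun k => aChar (aByteChars ((l.drop (8 * k)).take 8))) = achars l := by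
  intro m
  induction m with
  | zero =>
    intro l h1 _
    have : l = [] := List.eq_nil_of_length_eq_zero (by omega)
    subst this; simp [achars]
  | succ m ih =>
    intro l h1 h2
    have hpos : 0 < l.length := by omega
    have hnil : l ≠ [] := by intro h; rw [h] at hpos; simp at hpos
    rw [List.range_succ_eq_map, List.map_cons, List.map_map]
    have hshift : ((fun k => aChar (aByteChars ((l.drop (8 * k)).take 8))) ∘ Nat.succ) =
        fun k => aChar (aByteChars (((l.drop 8).drop (8 * k)).take 8)) := by
      funext k
      simp only [Function.comp]
      rw [show 8 * Nat.succ k = 8 + 8 * k by omega, ← List.drop_drop]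
    rw [hshift, ih (l.drop 8) (by simp only [List.length_drop]; omega)
      (by simp only [List.length_drop]; omega)]
    conv_rhs => rw [achars]
    rw [dif_neg hnil]
    norm_num

lemma A_eq (l : List Int) : bit_array_2string l = String.mk (achars l) := by
  have h0 : bit_array_2string l = String.mk
      ((((PySem.List.pyRange 0 (l.length : Int) 8).map
        (fun i => PySem.List.slice l (some i) (some (i + 8)))).foldl
        (fun acc byte => acc ++ [aByteChars byte]) ([] : List (List Char))).map aChar) := rfl
  rw [h0, PySem.List.foldl_append_singleton_eq_map aByteChars, List.nil_append, List.map_map,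
    PySem.List.pyRange_of_pos 0 (l.length : Int) (by omega), List.map_map]
  by_cases hnil : l = []
  · subst hnil; simp [achars]
  have hpos : 0 < l.length := List.length_pos_iff.mpr hnil
  have hposZ : (0 : Int) < (l.length : Int) := by omega
  rw [if_pos hposZ]
  have hm : (((l.length : Int) - 0 + 8 - 1) / 8).toNat = (l.length + 7) / 8 := by
    omega
  rw [hm]
  rw [List.map_map]
  have hfun : ∀ k ∈ List.range ((l.length + 7) / 8),
      (((aChar ∘ aByteChars) ∘ fun i : Int => PySem.List.slice l (some i) (some (i + 8))) ∘
        fun k : Nat => (0 : Int) + 8 * (k : Int)) k =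
      aChar (aByteChars ((l.drop (8 * k)).take 8)) := by
    intro k _
    simp only [Function.comp]
    congr 2
    rw [show (0 : Int) + 8 * (k : Int) = ((8 * k : Nat) : Int) by push_cast; ring]
    exact PySem.List.slice_natCast_add l (8 * k) 8
  rw [List.map_congr_left hfun]
  exact congrArg String.mk (chunkA ((l.length + 7) / 8) l (by omega) (by omega))

-- ===== VERDICT (by name: the statement is the Claim_ definition above) =====
theorem bit_array_2string_spec : Claim_equal_bit_array_2string := by
  intro array _ _
  unfold Spec_bit_array_2string
  rw [A_eq array]
  rw [show bit_array_2string_alt array =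
    String.mk (bFinal ((PySem.List.enumerate array 1).foldl bAltStep
      (([] : List Char), ([] : List Char)))) from rfl]
  rw [show (1 : Int) = 0 + 1 from rfl]
  rw [main_loop array.length array le_rfl 0 [] (by norm_num) le_rfl]
  simp
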